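-- pv_equiv track=rewrite | github.com/Adelodunpeter25/Resumade | backend/app/services/pdf_parser_service.py | _find_sections
-- ===== SOURCE A (Python) =====
-- from typing import Dict, List, Tuple
--
-- def _find_sections(lines: List[str]) -> Dict[str, List[str]]:
--     """Find major resume sections"""
--     sections = {}
--     current_section = None
--     current_content = []
--
--     section_keywords = {
--         'experience': ['experience', 'work', 'employment', 'professional'],
--         'education': ['education', 'academic', 'university', 'college'],
--         'skills': ['skills', 'technical', 'competencies', 'technologies'],
--         'projects': ['projects', 'portfolio', 'personal projects'],
--         'certifications': ['certifications', 'certificates', 'licenses', 'credentials']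
--     }
--
--     for line in lines:
--         line_lower = line.lower().strip()
--
--         # Check if this is a section header
--         found_section = None
--         for section, keywords in section_keywords.items():
--             if any(keyword in line_lower for keyword in keywords) and len(line.split()) <= 4:
--                 found_section = section
--                 break
--
--         if found_section:
--             # Save previous section
--             if current_section and current_content:
--                 sections[current_section] = current_content
--
--             current_section = found_section
--             current_content = []
--         elif current_section and line.strip():
--             current_content.append(line)
--
--     # Save last section
--     if current_section and current_content:
--         sections[current_section] = current_content
--
--     return sections
-- ===== SOURCE B (Python) =====
-- def _find_sections(lines):
--     """Find major resume sections: skip the preamble, then carve off one header+body segment at a time."""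
--     section_keywords = {
--         'experience': ['experience', 'work', 'employment', 'professional'],
--         'education': ['education', 'academic', 'university', 'college'],
--         'skills': ['skills', 'technical', 'competencies', 'technologies'],
--         'projects': ['projects', 'portfolio', 'personal projects'],
--         'certifications': ['certifications', 'certificates', 'licenses', 'credentials']
--     }
--
--     def header_of(line):
--         if len(line.split()) > 4:
--             return None
--         low = line.lower().strip()
--         for section, kws in section_keywords.items():
--             if any(k in low for k in kws):
--                 return section
--         return None
--
--     n = len(lines)
--
--     # drop everything before the first header
--     i = 0
--     while i < n and header_of(lines[i]) is None:
--         i += 1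
--
--     sections = {}
--     while i < n:
--         h = header_of(lines[i])
--         j = i + 1
--         body = []
--         while j < n and header_of(lines[j]) is None:
--             body.append(lines[j])
--             j += 1
--         content = [ln for ln in body if ln.strip()]
--         if h and content:
--             sections[h] = content
--         i = j
--     return sections
-- ===== Notes on version B (the rewrite author's own statement) =====
-- stated objective: alternative
-- what changed: B replaces A's single fold carrying (current_section, current_content) accumulator state with a two-level segment decomposition: drop the pre-header preamble, then repeatedly carve off the next header plus its body (lines up to the next header) and insert the filtered body into the dict.
import Mathlib
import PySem

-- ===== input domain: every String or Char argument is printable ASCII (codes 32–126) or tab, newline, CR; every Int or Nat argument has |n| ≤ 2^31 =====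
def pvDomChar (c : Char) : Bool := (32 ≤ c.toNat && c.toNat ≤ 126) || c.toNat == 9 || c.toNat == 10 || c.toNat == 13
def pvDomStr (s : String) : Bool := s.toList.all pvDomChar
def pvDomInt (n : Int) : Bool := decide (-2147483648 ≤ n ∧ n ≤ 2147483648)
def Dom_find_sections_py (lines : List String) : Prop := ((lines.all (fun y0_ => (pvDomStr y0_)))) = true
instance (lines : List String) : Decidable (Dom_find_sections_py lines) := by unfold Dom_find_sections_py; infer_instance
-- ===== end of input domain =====

-- B carves the line list into header+body segments (skip preamble, then repeatedly split off the next segment) instead of A's single fold carrying (current_section, current_content); objective: alternative decomposition, same cost.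


-- ===== PORT A =====
-- the section_keywords dict literal, shared by both ports (both Pythons carry the same literal)
def pvKeywords : List (String × List String) :=
  [("experience", ["experience", "work", "employment", "professional"]),
   ("education", ["education", "academic", "university", "college"]),
   ("skills", ["skills", "technical", "competencies", "technologies"]),
   ("projects", ["projects", "portfolio", "personal projects"]),
   ("certifications", ["certifications", "certificates", "licenses", "credentials"])]

-- "if current_section and current_content: sections[current_section] = current_content" (appears twice in A)
def finA (sections : PySem.Dict String (List String)) (cs : Option String) (cc : List String) :
    PySem.Dict String (List String) :=
  match cs with
  | some s => if cc.isEmpty then sections else sections.insert s cc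
  | none => sections

-- A's loop body
def stepA (st : PySem.Dict String (List String) × Option String × List String) (line : String) :
    PySem.Dict String (List String) × Option String × List String :=
  let sections := st.1
  let cs := st.2.1
  let cc := st.2.2
  let line_lower := PySem.Str.strip (PySem.Str.lower line)
  let found := (pvKeywords.find? (fun p =>
      p.2.any (fun k => PySem.Str.isIn k line_lower) &&
      decide ((PySem.Str.split₀ line).length ≤ 4))).map (·.1)
  match found with
  | some fs => (finA sections cs cc, some fs, [])
  | none =>
    match cs with
    | some _ =>
      if PySem.Str.strip line ≠ "" then (sections, cs, cc ++ [line]) else (sections, cs, cc)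
    | none => (sections, cs, cc)

def find_sections_py (lines : List String) : List (String × List String) :=
  let fin := lines.foldl stepA (PySem.Dict.empty, none, [])
  (finA fin.1 fin.2.1 fin.2.2).items

-- ===== PORT B =====
def headerOf (line : String) : Option String :=
  if (PySem.Str.split₀ line).length > 4 then none
  else
    let low := PySem.Str.strip (PySem.Str.lower line)
    (pvKeywords.find? (fun p => p.2.any (fun k => PySem.Str.isIn k low))).map (·.1)

-- the inner while loop: body lines up to the next header, and what remains
def takeBody : List String → List String × List String
  | [] => ([], [])
  | l :: ls =>
    if (headerOf l).isNone then
      (l :: (takeBody ls).1, (takeBody ls).2)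
    else ([], l :: ls)

-- the first while loop: drop lines before the first header
def dropPre : List String → List String
  | [] => []
  | l :: ls => if (headerOf l).isNone then dropPre ls else l :: ls

theorem takeBody_snd_length_le (ls : List String) : (takeBody ls).2.length ≤ ls.length := by
  induction ls with
  | nil => simp [takeBody]
  | cons l ls ih =>
    simp only [takeBody]
    split
    · exact le_trans ih (Nat.le_succ _)
    · simp

def altGo : PySem.Dict String (List String) → List String → PySem.Dict String (List String)
  | d, [] => d
  | d, l :: ls =>
    let body := (takeBody ls).1
    let tail := (takeBody ls).2
    let content := body.filter (fun ln => PySem.Str.strip ln ≠ "")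
    let d' := match headerOf l with
      | some s => if content.isEmpty then d else d.insert s content
      | none => d
    altGo d' tail
termination_by _ rest => rest.length
decreasing_by exact Nat.lt_succ_of_le (takeBody_snd_length_le ls)

def find_sections_py_alt (lines : List String) : List (String × List String) :=
  (altGo PySem.Dict.empty (dropPre lines)).items

-- ===== PRECONDITION & SPEC =====
def Spec_find_sections_py (lines : List String) (out : List (String × List String)) : Prop := out = find_sections_py_alt lines
instance (lines : List String) (out : List (String × List String)) : Decidable (Spec_find_sections_py lines out) := by unfold Spec_find_sections_py; infer_instance

-- ===== CLAIM (what is proved, stated in full; the proofs are below) =====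
def Claim_equal_find_sections_py : Prop := ∀ (lines : List String), Dom_find_sections_py lines → Spec_find_sections_py lines (find_sections_py lines)

-- ===== LEMMAS AND PROOFS =====

-- find? over a predicate with a constant conjunct
theorem find?_and_const {α : Type} (l : List α) (f : α → Bool) (c : Bool) :
    l.find? (fun x => f x && c) = if c then l.find? f else none := by
  cases c
  · simp [List.find?_eq_none]
  · simp

-- A's inline header test computes headerOf
theorem found_eq (line : String) :
    (pvKeywords.find? (fun p =>
      p.2.any (fun k => PySem.Str.isIn k (PySem.Str.strip (PySem.Str.lower line))) &&
      decide ((PySem.Str.split₀ line).length ≤ 4))).map (·.1) = headerOf line := by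
  unfold headerOf
  rw [find?_and_const]
  by_cases h : (PySem.Str.split₀ line).length ≤ 4
  · have h' : ¬ (PySem.Str.split₀ line).length > 4 := by omega
    simp [h, h']
  · have h' : (PySem.Str.split₀ line).length > 4 := by omega
    simp [h, h']

theorem stepA_header (d : PySem.Dict String (List String)) (cs : Option String) (cc : List String)
    (l : String) (s' : String) (h : headerOf l = some s') :
    stepA (d, cs, cc) l = (finA d cs cc, some s', []) := by
  unfold stepA
  dsimp only
  rw [found_eq, h]

theorem stepA_nohdr_some (d : PySem.Dict String (List String)) (s : String) (cc : List String)
    (l : String) (h : headerOf l = none) :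
    stepA (d, some s, cc) l =
      (d, some s, if PySem.Str.strip l ≠ "" then cc ++ [l] else cc) := by
  unfold stepA
  dsimp only
  rw [found_eq, h]
  split
  · simp_all
  · split <;> rfl

theorem stepA_nohdr_none (d : PySem.Dict String (List String)) (cc : List String)
    (l : String) (h : headerOf l = none) :
    stepA (d, none, cc) l = (d, none, cc) := by
  unfold stepA
  dsimp only
  rw [found_eq, h]

theorem takeBody_eq (ls : List String) :
    takeBody ls = (ls.takeWhile (fun x => (headerOf x).isNone),
                   ls.dropWhile (fun x => (headerOf x).isNone)) := by
  induction ls with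
  | nil => simp [takeBody]
  | cons l ls ih =>
    simp only [takeBody, List.takeWhile_cons, List.dropWhile_cons]
    by_cases h : (headerOf l).isNone = true
    · simp [h, ih]
    · simp [Bool.of_not_eq_true h]

theorem dropPre_eq (ls : List String) :
    dropPre ls = ls.dropWhile (fun x => (headerOf x).isNone) := by
  induction ls with
  | nil => simp [dropPre]
  | cons l ls ih =>
    simp only [dropPre, List.dropWhile_cons]
    by_cases h : (headerOf l).isNone = true
    · simp [h, ih]
    · simp [Bool.of_not_eq_true h]

-- the run of A's loop from a given state, followed by A's final save
def runA (st : PySem.Dict String (List String) × Option String × List String)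
    (ls : List String) : PySem.Dict String (List String) :=
  let r := ls.foldl stepA st
  finA r.1 r.2.1 r.2.2

-- altGo unfolded at a header line, via takeBody_eq and finA
theorem altGo_cons_header (d : PySem.Dict String (List String)) (l : String) (ls : List String)
    (s : String) (h : headerOf l = some s) :
    altGo d (l :: ls) =
      altGo (finA d (some s)
        (((ls.takeWhile (fun x => (headerOf x).isNone)).filter
            (fun ln => PySem.Str.strip ln ≠ ""))))
        (ls.dropWhile (fun x => (headerOf x).isNone)) := by
  rw [altGo]
  simp only [takeBody_eq, h, finA]

-- mid-segment invariant: A's fold from state (d, some s, cc) completes the current segment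
theorem L_some (ls : List String) (d : PySem.Dict String (List String)) (s : String)
    (cc : List String) :
    runA (d, some s, cc) ls =
      altGo (finA d (some s)
          (cc ++ ((ls.takeWhile (fun x => (headerOf x).isNone)).filter
              (fun ln => PySem.Str.strip ln ≠ ""))))
        (ls.dropWhile (fun x => (headerOf x).isNone)) := by
  induction ls generalizing d s cc with
  | nil => simp [runA, altGo, List.foldl]
  | cons l ls ih =>
    cases h : headerOf l with
    | some s' =>
      rw [runA, List.foldl_cons, stepA_header _ _ _ _ _ h, ← runA, ih]
      rw [List.takeWhile_cons, List.dropWhile_cons]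
      simp only [h, Option.isNone_some, Bool.false_eq_true, if_false,
        List.filter_nil, List.append_nil]
      rw [altGo_cons_header _ _ _ _ h]
      simp [finA]
    | none =>
      rw [runA, List.foldl_cons, stepA_nohdr_some _ _ _ _ h, ← runA, ih]
      rw [List.takeWhile_cons, List.dropWhile_cons]
      simp only [h, Option.isNone_none, if_true, List.filter_cons]
      by_cases hl : PySem.Str.strip l ≠ ""
      · simp [hl]
      · simp [hl]

-- preamble invariant: A's fold from state (d, none, cc) skips to the first header
theorem L_none (ls : List String) (d : PySem.Dict String (List String)) (cc : List String) :
    runA (d, none, cc) ls = altGo d (ls.dropWhile (fun x => (headerOf x).isNone)) := by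
  induction ls generalizing cc with
  | nil => simp [runA, altGo, List.foldl, finA]
  | cons l ls ih =>
    cases h : headerOf l with
    | some s' =>
      rw [runA, List.foldl_cons, stepA_header _ _ _ _ _ h, ← runA, L_some]
      rw [List.dropWhile_cons]
      simp only [h, Option.isNone_some, Bool.false_eq_true, if_false, finA,
        List.nil_append]
      rw [altGo_cons_header _ _ _ _ h]
      simp [finA]
    | none =>
      rw [runA, List.foldl_cons, stepA_nohdr_none _ _ _ h, ← runA, ih]
      rw [List.dropWhile_cons]
      simp [h]

-- ===== VERDICT (by name: the statement is the Claim_ definition above) =====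
theorem find_sections_py_spec : Claim_equal_find_sections_py := by
  intro lines _
  unfold Spec_find_sections_py find_sections_py find_sections_py_alt
  have : runA (PySem.Dict.empty, none, []) lines
      = altGo PySem.Dict.empty (dropPre lines) := by
    rw [L_none, dropPre_eq]
  simpa [runA] using congrArg PySem.Dict.items this
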